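-- pv_equiv track=rewrite | github.com/xsustek/python_PV248 | 08-stat/stat_utils.py | date_dic
-- ===== SOURCE A (Python) =====
-- def date_dic(dic):
--     res = {}
--     for k, e in dic.items():
--         for ik, ie in e.items():
--             if not res.__contains__(ik):
--                 res[ik] = []
--             res[ik].append(sum(ie))
--     return res
-- ===== SOURCE B (Python) =====
-- def date_dic(dic):
--     # Column-wise gather: first collect the inner keys in first-encounter order,
--     # then build each result bucket in one comprehension over the outer entries.
--     order = []
--     seen = set()
--     for e in dic.values():
--         for ik in e:
--             if ik not in seen:
--                 seen.add(ik)
--                 order.append(ik)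
--     return {ik: [sum(e[ik]) for e in dic.values() if ik in e] for ik in order}
-- ===== Notes on version B (the rewrite author's own statement) =====
-- stated objective: alternative
-- what changed: A scatters row-wise, appending sum(ie) into a result dict while iterating each inner dict; B first builds the unique inner-key order in one pass, then gathers each bucket column-wise with a comprehension over the outer entries.
import Mathlib
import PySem

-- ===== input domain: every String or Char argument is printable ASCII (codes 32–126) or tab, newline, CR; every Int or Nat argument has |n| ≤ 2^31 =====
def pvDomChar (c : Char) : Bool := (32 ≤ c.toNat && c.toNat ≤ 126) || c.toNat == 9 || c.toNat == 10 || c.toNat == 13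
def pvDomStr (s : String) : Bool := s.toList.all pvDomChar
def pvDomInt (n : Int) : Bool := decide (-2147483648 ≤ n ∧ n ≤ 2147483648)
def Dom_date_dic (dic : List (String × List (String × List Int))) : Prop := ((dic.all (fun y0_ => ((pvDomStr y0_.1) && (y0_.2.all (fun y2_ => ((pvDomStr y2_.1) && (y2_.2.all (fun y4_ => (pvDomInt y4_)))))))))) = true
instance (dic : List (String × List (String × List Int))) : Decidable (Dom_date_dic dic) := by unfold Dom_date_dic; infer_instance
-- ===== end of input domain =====

-- B gathers column-wise (inner-key order collected first, then one bucket comprehension per key)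
-- instead of A's row-wise scatter into a result dict; objective: alternative decomposition, not faster.


-- ===== PORT A =====
def date_dic (dic : List (String × List (String × List Int))) : List (String × List Int) :=
  (dic.foldl (fun res ke =>
      ke.2.foldl (fun res ike =>
        let res := if res.contains ike.1 then res else res.insert ike.1 ([] : List Int)
        res.modify ike.1 [] (fun l => l ++ [ike.2.sum])) res)
    PySem.Dict.empty).items

-- ===== PORT B =====
def date_dic_alt (dic : List (String × List (String × List Int))) : List (String × List Int) :=
  let order : PySem.Set String :=
    dic.foldl (fun s ke => ke.2.foldl (fun s ike => PySem.Set.add s ike.1) s) PySem.Set.empty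
  order.map (fun ik =>
    (ik, dic.filterMap (fun ke => ((PySem.Dict.mk ke.2).get? ik).map (fun ie => ie.sum))))

-- ===== PRECONDITION & SPEC =====
-- Pre_ only requires the association lists to represent Python dicts: an outer list or an inner
-- list with a duplicate key does not arise from any dict input (Python dict keys are unique).
def Pre_date_dic (dic : List (String × List (String × List Int))) : Prop :=
  (dic.map Prod.fst).Nodup ∧ ∀ p ∈ dic, (p.2.map Prod.fst).Nodup
instance (dic : List (String × List (String × List Int))) : Decidable (Pre_date_dic dic) := by
  unfold Pre_date_dic; infer_instance
def pvWitness_date_dic : (List (String × List (String × List Int))) :=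
  [("d1", [("a", [1, 2]), ("b", [3])]), ("d2", [("b", [4, 5])])]

def Spec_date_dic (dic : List (String × List (String × List Int))) (out : List (String × List Int)) : Prop := out = date_dic_alt dic
instance (dic : List (String × List (String × List Int))) (out : List (String × List Int)) : Decidable (Spec_date_dic dic out) := by unfold Spec_date_dic; infer_instance

-- ===== CLAIM (what is proved, stated in full; the proofs are below) =====
def Claim_equal_date_dic : Prop := ∀ (dic : List (String × List (String × List Int))), Dom_date_dic dic → Pre_date_dic dic → Spec_date_dic dic (date_dic dic)

-- ===== LEMMAS AND PROOFS =====

-- A's loop body (insert-[]-if-absent, then append) is one `modify` with default []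
theorem stepA (res : PySem.Dict String (List Int)) (k : String) (s : Int) :
    (if res.contains k then res else res.insert k ([] : List Int)).modify k []
        (fun l => l ++ [s])
      = res.modify k [] (fun l => l ++ [s]) := by
  by_cases h : res.contains k
  · simp [h]
  · simp only [h, Bool.false_eq_true, if_false]
    simp [PySem.Dict.modify, PySem.Dict.getD_insert_self, PySem.Dict.insert_insert_self,
      PySem.Dict.getD_of_not_contains res [] (eq_false_of_ne_true h)]

-- B's per-entry lookup, as a list, is the filter of the entry by the key (inner keys Nodup)
theorem getq (e : List (String × List Int)) (he : (e.map Prod.fst).Nodup) (ik : String) :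
    (((PySem.Dict.mk e).get? ik).map (fun ie => ie.sum)).toList
      = ((e.filter (fun p => p.1 == ik)).map (fun p => p.2.sum)) := by
  induction e with
  | nil => simp [PySem.Dict.get?]
  | cons p rest ih =>
    simp only [List.map_cons, List.nodup_cons] at he
    rw [PySem.Dict.get?_mk_cons]
    by_cases h : p.1 = ik
    · subst h
      have : rest.filter (fun q => q.1 == p.1) = [] := by
        rw [List.filter_eq_nil_iff]
        intro q hq hbeq
        exact he.1 (List.mem_map.mpr ⟨q, hq, by simpa using hbeq⟩)
      simp [this]
    · simp only [beq_iff_eq]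
      rw [if_neg h]
      simp only [List.filter_cons, beq_iff_eq, h, if_false]
      rw [ih he.2]

-- the main equivalence: both programs are the items of the grouping dict of the flattened input
theorem date_dic_eq_alt (dic : List (String × List (String × List Int)))
    (hin : ∀ p ∈ dic, (p.2.map Prod.fst).Nodup) :
    date_dic dic = date_dic_alt dic := by
  set L := dic.flatMap Prod.snd with hL
  -- A side: collapse the two folds into one fold over L, simplifying the step with stepA
  have hA : date_dic dic =
      (L.foldl (fun d p => d.modify p.1 [] (fun l => l ++ [p.2.sum])) PySem.Dict.empty).items := by
    unfold date_dic
    simp only [stepA]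
    rw [hL, List.flatMap, List.foldl_flatten, List.foldl_map]
  -- rewrite A's fold over L as a fold over pre-summed pairs
  have hP : (L.foldl (fun d p => d.modify p.1 [] (fun l => l ++ [p.2.sum])) PySem.Dict.empty)
      = ((L.map (fun p => (p.1, p.2.sum))).foldl
          (fun d p => d.modify p.1 [] (fun l => l ++ [p.2])) PySem.Dict.empty) := by
    rw [List.foldl_map]
  set D := (L.map (fun p => (p.1, p.2.sum))).foldl
      (fun d p => d.modify p.1 [] (fun l => l ++ [p.2]))
      (PySem.Dict.empty : PySem.Dict String (List Int)) with hD
  have hkeys : D.keys = PySem.Set.ofList (L.map Prod.fst) := by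
    rw [hD]
    rw [PySem.Dict.keys_foldl_modify_key _ Prod.fst [] (fun _ p v => v ++ [p.2]) _]
    rw [PySem.Dict.keys_empty, PySem.Set.update_nil_left, List.map_map]
    rfl
  have hnd : D.keys.Nodup := by
    rw [hD]
    exact PySem.Dict.nodup_keys_foldl_modify_key _ Prod.fst [] (fun _ p v => v ++ [p.2]) _
      PySem.Dict.nodup_keys_empty
  have hitems : D.items = D.keys.map (fun k => (k, D.getD k [])) :=
    PySem.Dict.items_eq_map_keys D hnd []
  have hbuck : ∀ k, D.getD k [] = (L.filter (fun p => p.1 == k)).map (fun p => p.2.sum) := by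
    intro k
    rw [hD, PySem.Dict.getD_foldl_modify_append, PySem.Dict.getD_empty]
    rw [List.filter_map]
    simp [Function.comp_def]
  -- B side: the collected key order is exactly D's key list
  have horder : (dic.foldl (fun s ke => ke.2.foldl (fun s ike => PySem.Set.add s ike.1) s)
      PySem.Set.empty) = PySem.Set.ofList (L.map Prod.fst) := by
    have h1 : List.foldl (fun s ike => PySem.Set.add s ike.1) PySem.Set.empty L
        = dic.foldl (fun s ke => ke.2.foldl (fun s ike => PySem.Set.add s ike.1) s)
            PySem.Set.empty := by
      rw [hL, List.flatMap, List.foldl_flatten, List.foldl_map]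
    rw [← h1, ← PySem.Set.update_map_eq_foldl_add L Prod.fst PySem.Set.empty]
    rfl
  -- B's bucket for each key equals A's bucket
  have hbuckB : ∀ ik,
      dic.filterMap (fun ke => ((PySem.Dict.mk ke.2).get? ik).map (fun ie => ie.sum))
        = (L.filter (fun p => p.1 == ik)).map (fun p => p.2.sum) := by
    intro ik
    rw [List.filterMap_eq_flatMap_toList, hL, List.filter_flatMap, List.map_flatMap]
    rw [List.flatMap, List.flatMap]
    congr 1
    apply List.map_congr_left
    intro ke hke
    exact getq ke.2 (hin ke hke) ik
  rw [hA, hP, hitems, hkeys]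
  unfold date_dic_alt
  simp only [horder]
  apply List.map_congr_left
  intro k hk
  rw [hbuck k, hbuckB k]

-- ===== VERDICT (by name: the statement is the Claim_ definition above) =====
theorem date_dic_spec : Claim_equal_date_dic := by
  intro dic _hdom hpre
  unfold Spec_date_dic
  exact date_dic_eq_alt dic hpre.2
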